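-- pv_equiv track=rewrite | github.com/thepratholic/Competitive-Programming | LeetCode/Weekly Contest 477/Find Maximum Balanced XOR Subarray Length.py | maxBalancedSubarray
-- ===== SOURCE A (Python) =====
-- from typing import List
--
-- def maxBalancedSubarray(nums: List[int]) -> int:
--     n = len(nums)
--
--     if n == 1:
--         return 0
--
--     if n == 1:
--         return 0
--
--     ans = 0
--     xr = 0
--     bal = 0  # even - odd
--
--     mpp = {(0, 0): -1}
--
--     for i in range(n):
--         xr ^= nums[i]
--
--         if nums[i] % 2 == 0:
--             bal += 1
--         else:
--             bal -= 1
--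
--         state = (xr, bal)
--
--         if state in mpp:
--             ans = max(ans, i - mpp[state])
--         else:
--             mpp[state] = i
--
--     return ans
-- ===== SOURCE B (Python) =====
-- from typing import List
--
-- def maxBalancedSubarray(nums: List[int]) -> int:
--     n = len(nums)
--     ans = 0
--     for i in range(n):
--         xr = 0
--         bal = 0
--         for j in range(i, n):
--             xr ^= nums[j]
--             if nums[j] % 2 == 0:
--                 bal += 1
--             else:
--                 bal -= 1
--             if xr == 0 and bal == 0:
--                 ans = max(ans, j - i + 1)
--     return ans
-- ===== Notes on version B (the rewrite author's own statement) =====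
-- stated objective: simpler
-- what changed: Replaced A's single-pass prefix xor/balance state with a first-occurrence hashmap by the plain nested double loop that, for every start index, rescans the suffix tracking segment xor and even/odd balance and takes the max length where both are zero; the dict and the duplicated n==1 guards disappear.
import Mathlib
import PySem

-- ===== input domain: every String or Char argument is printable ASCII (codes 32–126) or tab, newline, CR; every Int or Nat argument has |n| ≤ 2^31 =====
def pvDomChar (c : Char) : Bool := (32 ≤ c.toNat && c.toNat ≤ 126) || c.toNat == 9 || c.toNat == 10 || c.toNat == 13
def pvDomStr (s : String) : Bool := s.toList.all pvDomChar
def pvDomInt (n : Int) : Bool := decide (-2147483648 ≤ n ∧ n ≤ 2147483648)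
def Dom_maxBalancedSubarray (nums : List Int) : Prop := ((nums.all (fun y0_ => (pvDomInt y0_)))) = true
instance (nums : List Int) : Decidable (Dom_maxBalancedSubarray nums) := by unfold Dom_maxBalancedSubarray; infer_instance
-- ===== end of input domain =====

-- B replaces A's single-pass prefix-state hashmap with the plain quadratic double loop
-- (objective: simpler — no dict, no prefix-state bookkeeping; B is not faster).

-- ===== PORT A =====
-- literal port of Source A: prefix xor/balance state, first-occurrence dict, running max
def maxBalancedSubarray (nums : List Int) : Int :=
  let n : Int := (nums.length : Int)
  if n = 1 then 0
  else if n = 1 then 0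
  else
    let mpp : PySem.Dict (Int × Int) Int := PySem.Dict.ofList [(((0 : Int), (0 : Int)), (-1 : Int))]
    let res := (PySem.List.pyRange 0 n 1).foldl
      (fun (st : Int × Int × Int × PySem.Dict (Int × Int) Int) i =>
        let xr := PySem.Int.bxor st.2.1 (PySem.List.pyGetD nums i 0)
        let bal := if PySem.Int.mod (PySem.List.pyGetD nums i 0) 2 = 0 then st.2.2.1 + 1 else st.2.2.1 - 1
        match st.2.2.2.get? (xr, bal) with
        | some v => (max st.1 (i - v), xr, bal, st.2.2.2)
        | none => (st.1, xr, bal, st.2.2.2.insert (xr, bal) i))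
      (0, 0, 0, mpp)
    res.1

-- ===== PORT B =====
-- literal port of Source B: for each start index i, rescan tracking segment xor and balance
def maxBalancedSubarray_alt (nums : List Int) : Int :=
  let n : Int := (nums.length : Int)
  (PySem.List.pyRange 0 n 1).foldl
    (fun ans i =>
      ((PySem.List.pyRange i n 1).foldl
        (fun (st : Int × Int × Int) j =>
          let xr := PySem.Int.bxor st.2.1 (PySem.List.pyGetD nums j 0)
          let bal := if PySem.Int.mod (PySem.List.pyGetD nums j 0) 2 = 0 then st.2.2 + 1 else st.2.2 - 1
          ((if xr = 0 ∧ bal = 0 then max st.1 (j - i + 1) else st.1), xr, bal))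
        (ans, 0, 0)).1)
    0

-- ===== PRECONDITION & SPEC =====
def Spec_maxBalancedSubarray (nums : List Int) (out : Int) : Prop := out = maxBalancedSubarray_alt nums
instance (nums : List Int) (out : Int) : Decidable (Spec_maxBalancedSubarray nums out) := by unfold Spec_maxBalancedSubarray; infer_instance

-- ===== CLAIM (what is proved, stated in full; the proofs are below) =====
def Claim_equal_maxBalancedSubarray : Prop := ∀ (nums : List Int), Dom_maxBalancedSubarray nums → Spec_maxBalancedSubarray nums (maxBalancedSubarray nums)

-- ===== LEMMAS AND PROOFS =====

-- ---- xor algebra for PySem.Int.bxor via a (sign, magnitude-code) encoding ----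
def pvMag (a : Int) : Nat := if 0 ≤ a then a.toNat else (-a - 1).toNat
def pvSgn (a : Int) : Bool := decide (a < 0)
def pvDec (s : Bool) (m : Nat) : Int := if s then -(m : Int) - 1 else (m : Int)

theorem pv_bxor_eq (a b : Int) :
    PySem.Int.bxor a b = pvDec (pvSgn a != pvSgn b) (pvMag a ^^^ pvMag b) := by
  simp only [PySem.Int.bxor, pvDec, pvSgn, pvMag, bne_iff_ne, ne_eq, decide_eq_decide]
  split_ifs <;> first | rfl | omega

theorem pv_sgn_dec (s : Bool) (m : Nat) : pvSgn (pvDec s m) = s := by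
  cases s <;> simp [pvSgn, pvDec] <;> omega

theorem pv_mag_dec (s : Bool) (m : Nat) : pvMag (pvDec s m) = m := by
  cases s <;> simp [pvMag, pvDec] <;> omega

theorem pv_dec_id (a : Int) : pvDec (pvSgn a) (pvMag a) = a := by
  by_cases ha : a < 0
  · simp [pvDec, pvSgn, pvMag, ha, not_le.mpr ha]
  · simp [pvDec, pvSgn, pvMag, ha, not_lt.mp ha]

theorem pv_bxor_assoc (a b c : Int) :
    PySem.Int.bxor (PySem.Int.bxor a b) c = PySem.Int.bxor a (PySem.Int.bxor b c) := by
  rw [pv_bxor_eq a b, pv_bxor_eq b c, pv_bxor_eq _ c, pv_bxor_eq a _,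
      pv_sgn_dec, pv_mag_dec, pv_sgn_dec, pv_mag_dec]
  cases pvSgn a <;> cases pvSgn b <;> cases pvSgn c <;> simp [Nat.xor_assoc]

theorem pv_bxor_eq_self_iff (x y : Int) : PySem.Int.bxor x y = x ↔ y = 0 := by
  constructor
  · intro h
    have hs : pvSgn x = (pvSgn x != pvSgn y) := by
      conv_lhs => rw [← h, pv_bxor_eq, pv_sgn_dec]
    have hm : pvMag x = pvMag x ^^^ pvMag y := by
      conv_lhs => rw [← h, pv_bxor_eq, pv_mag_dec]
    have hy : pvSgn y = false := by cases hx : pvSgn x <;> cases hy' : pvSgn y <;> simp_all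
    have hmy : pvMag y = 0 := by
      have h2 := Nat.xor_xor_cancel_left (pvMag x) (pvMag y)
      rw [← hm] at h2
      simp at h2
      omega
    have hid := pv_dec_id y
    rw [hy, hmy] at hid
    simpa [pvDec] using hid.symm
  · intro h
    subst h
    exact PySem.Int.bxor_zero x

-- ---- prefix / segment states ----
def pvStep (s : Int × Int) (a : Int) : Int × Int :=
  (PySem.Int.bxor s.1 a, if PySem.Int.mod a 2 = 0 then s.2 + 1 else s.2 - 1)

def pvP (nums : List Int) (k : Nat) : Int × Int := (nums.take k).foldl pvStep (0, 0)

def pvQ (nums : List Int) (i m : Nat) : Int × Int := ((nums.take m).drop i).foldl pvStep (0, 0)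

theorem pv_shift (l : List Int) (s : Int × Int) :
    l.foldl pvStep s =
      (PySem.Int.bxor s.1 (l.foldl pvStep (0, 0)).1, s.2 + (l.foldl pvStep (0, 0)).2) := by
  induction l generalizing s with
  | nil => simp [PySem.Int.bxor_zero]
  | cons x xs ih =>
    simp only [List.foldl_cons]
    rw [ih (pvStep s x), ih (pvStep ((0 : Int), (0 : Int)) x)]
    have h0 : PySem.Int.bxor (0 : Int) x = x := by
      rw [PySem.Int.bxor_comm]; exact PySem.Int.bxor_zero x
    refine Prod.ext ?_ ?_
    · simp only [pvStep, h0]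
      rw [pv_bxor_assoc]
    · simp only [pvStep]
      split_ifs <;> ring

theorem pv_P_succ (nums : List Int) (m : Nat) (hm : m < nums.length) :
    pvP nums (m + 1) = pvStep (pvP nums m) (nums.getD m 0) := by
  unfold pvP
  rw [List.take_succ_eq_append_getElem hm, List.foldl_append]
  simp [List.getD, List.getElem?_eq_getElem hm]

theorem pv_P_split (nums : List Int) (i m : Nat) (him : i ≤ m) :
    pvP nums m = ((nums.take m).drop i).foldl pvStep (pvP nums i) := by
  conv_lhs => rw [pvP, ← List.take_append_drop i (nums.take m)]
  rw [List.foldl_append, List.take_take, min_eq_left him]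
  rfl

theorem pv_Q_self (nums : List Int) (i : Nat) : pvQ nums i i = (0, 0) := by
  unfold pvQ
  rw [List.drop_eq_nil_of_le (by simp)]
  rfl

theorem pv_Q_succ (nums : List Int) (i m : Nat) (hi : i ≤ m) (hm : m < nums.length) :
    pvQ nums i (m + 1) = pvStep (pvQ nums i m) (nums.getD m 0) := by
  unfold pvQ
  rw [List.take_succ_eq_append_getElem hm,
      List.drop_append_of_le_length (by simp; omega), List.foldl_append]
  simp [List.getD, List.getElem?_eq_getElem hm]

theorem pv_Q_zero_iff (nums : List Int) (i m : Nat) (him : i ≤ m) :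
    pvQ nums i m = (0, 0) ↔ pvP nums m = pvP nums i := by
  have hq : ((nums.take m).drop i).foldl pvStep ((0 : Int), (0 : Int)) = pvQ nums i m := rfl
  rw [pv_P_split nums i m him, pv_shift, hq]
  obtain ⟨q1, q2⟩ := pvQ nums i m
  obtain ⟨p1, p2⟩ := pvP nums i
  simp only [Prod.mk.injEq, pv_bxor_eq_self_iff]
  constructor
  · rintro ⟨h1, h2⟩; exact ⟨h1, by omega⟩
  · rintro ⟨h1, h2⟩; exact ⟨h1, by omega⟩

-- ---- generic running-max fold facts ----
theorem pv_le_foldl {α : Type} (f : Int → α → Int) (l : List α) (init : Int)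
    (hstep : ∀ a x, a ≤ f a x) : init ≤ l.foldl f init := by
  induction l generalizing init with
  | nil => simp
  | cons x xs ih => exact le_trans (hstep init x) (ih (f init x))

theorem pv_foldl_le {α : Type} (f : Int → α → Int) (l : List α) (c init : Int)
    (hinit : init ≤ c) (hstep : ∀ a x, x ∈ l → a ≤ c → f a x ≤ c) : l.foldl f init ≤ c := by
  induction l generalizing init with
  | nil => simpa
  | cons x xs ih =>
    exact ih (f init x) (hstep init x (by simp) hinit)
      (fun a y hy ha => hstep a y (by simp [hy]) ha)

theorem pv_foldl_ge {α : Type} (f : Int → α → Int) (l : List α) (init : Int) (b : α) (v : Int)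
    (hstep : ∀ a x, a ≤ f a x) (hb : b ∈ l) (hv : ∀ a, v ≤ f a b) : v ≤ l.foldl f init := by
  induction l generalizing init with
  | nil => simp at hb
  | cons x xs ih =>
    rcases List.mem_cons.mp hb with h | h
    · subst h
      exact le_trans (hv init) (pv_le_foldl f xs (f init b) hstep)
    · exact ih (f init x) h

-- ---- first occurrence of a prefix state, and A's value in closed form ----
def pvG (nums : List Int) (b : Nat) : Nat :=
  Nat.find (p := fun k => pvP nums k = pvP nums b) ⟨b, rfl⟩

theorem pv_G_le (nums : List Int) (b : Nat) : pvG nums b ≤ b := by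
  unfold pvG; exact Nat.find_le rfl

theorem pv_G_spec (nums : List Int) (b : Nat) : pvP nums (pvG nums b) = pvP nums b := by
  unfold pvG; exact Nat.find_spec (p := fun k => pvP nums k = pvP nums b) ⟨b, rfl⟩

theorem pv_G_min (nums : List Int) (b k : Nat) (h : pvP nums k = pvP nums b) :
    pvG nums b ≤ k := by
  unfold pvG; exact Nat.find_le h

def pvAV (nums : List Int) (m : Nat) : Int :=
  (List.range (m + 1)).foldl (fun a (b : Nat) => max a ((b : Int) - (pvG nums b : Int))) 0

theorem pv_AV_succ (nums : List Int) (m : Nat) :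
    pvAV nums (m + 1) = max (pvAV nums m) ((m + 1 : Int) - (pvG nums (m + 1) : Int)) := by
  unfold pvAV
  rw [List.range_succ (n := m + 1), List.foldl_append]
  rfl

theorem pv_AV_nonneg (nums : List Int) (m : Nat) : 0 ≤ pvAV nums m :=
  pv_le_foldl _ _ 0 (fun a _ => le_max_left a _)

-- ---- A's loop invariant ----
def pvInitA : Int × Int × Int × PySem.Dict (Int × Int) Int :=
  (0, 0, 0, PySem.Dict.ofList [(((0 : Int), (0 : Int)), (-1 : Int))])

def pvFA (nums : List Int) (st : Int × Int × Int × PySem.Dict (Int × Int) Int) (k : Nat) :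
    Int × Int × Int × PySem.Dict (Int × Int) Int :=
  let xr := PySem.Int.bxor st.2.1 (nums.getD k 0)
  let bal := if PySem.Int.mod (nums.getD k 0) 2 = 0 then st.2.2.1 + 1 else st.2.2.1 - 1
  match st.2.2.2.get? (xr, bal) with
  | some v => (max st.1 ((k : Int) - v), xr, bal, st.2.2.2)
  | none => (st.1, xr, bal, st.2.2.2.insert (xr, bal) (k : Int))

def pvDictInv (nums : List Int) (m : Nat) (d : PySem.Dict (Int × Int) Int) : Prop :=
  ∀ s : Int × Int,
    d.get? s = @dite _ (∃ k, pvP nums k = s ∧ k ≤ m) (Classical.dec _)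
        (fun h => some ((Nat.find (p := fun k => pvP nums k = s) (h.imp fun _ hk => hk.1) : Int) - 1))
        (fun _ => none)

theorem pv_A_norm (nums : List Int) (h1 : nums.length ≠ 1) :
    maxBalancedSubarray nums = ((List.range nums.length).foldl (pvFA nums) pvInitA).1 := by
  unfold maxBalancedSubarray
  have hn : ((nums.length : Int) = 1) = False := by
    simp; omega
  simp only [hn, if_false, PySem.List.pyRange_one, List.foldl_map]
  have h2 : (((nums.length : Int)) - 0).toNat = nums.length := by omega
  rw [h2]
  show (List.foldl _ pvInitA (List.range nums.length)).1 = _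
  congr 1
  apply List.foldl_ext
  intro a b _
  simp only [pvFA, zero_add, PySem.List.pyGetD_natCast]

theorem pv_A_inv (nums : List Int) (m : Nat) (hm : m ≤ nums.length) :
    ((List.range m).foldl (pvFA nums) pvInitA).1 = pvAV nums m ∧
    ((List.range m).foldl (pvFA nums) pvInitA).2.1 = (pvP nums m).1 ∧
    ((List.range m).foldl (pvFA nums) pvInitA).2.2.1 = (pvP nums m).2 ∧
    pvDictInv nums m ((List.range m).foldl (pvFA nums) pvInitA).2.2.2 := by
  unfold pvDictInv
  revert hm
  induction m with
  | zero =>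
    intro _
    refine ⟨?_, rfl, rfl, ?_⟩
    · have hg : pvG nums 0 = 0 := Nat.le_zero.mp (pv_G_le nums 0)
      simp [pvAV, hg, pvInitA]
    · intro s
      by_cases hs : s = ((0 : Int), (0 : Int))
      · rw [hs, dif_pos ⟨0, rfl, le_refl 0⟩]
        have hf0 : Nat.find (p := fun k => pvP nums k = ((0 : Int), (0 : Int)))
            ((⟨0, rfl, le_refl 0⟩ : ∃ k, pvP nums k = ((0 : Int), (0 : Int)) ∧ k ≤ 0).imp
              fun _ hk => hk.1) = 0 := by
          rw [Nat.find_eq_iff]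
          exact ⟨rfl, by omega⟩
        rw [hf0]
        rfl
      · rw [dif_neg]
        · show (PySem.Dict.mk [(((0 : Int), (0 : Int)), (-1 : Int))]).get? s = none
          rw [PySem.Dict.get?_mk_cons]
          have : (((0 : Int), (0 : Int)) == s) = false := by
            simpa using fun hcon => hs hcon.symm
          rw [this]
          rfl
        · rintro ⟨k, hk, hk0⟩
          have : k = 0 := by omega
          subst this
          exact hs hk.symm
  | succ m ih =>
    intro hm
    obtain ⟨ih1, ih2, ih3, ih4⟩ := ih (by omega)
    set st := (List.range m).foldl (pvFA nums) pvInitA with hst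
    rw [List.range_succ, List.foldl_append, List.foldl_cons, List.foldl_nil]
    have hx : pvP nums (m + 1) = pvStep (pvP nums m) (nums.getD m 0) :=
      pv_P_succ nums m (by omega)
    have e1 : PySem.Int.bxor st.2.1 (nums.getD m 0) = (pvP nums (m + 1)).1 := by
      rw [ih2, hx]; rfl
    have e2 : (if PySem.Int.mod (nums.getD m 0) 2 = 0 then st.2.2.1 + 1 else st.2.2.1 - 1) =
        (pvP nums (m + 1)).2 := by
      rw [ih3, hx]; rfl
    have hlook := ih4 (pvP nums (m + 1))
    by_cases h : ∃ k, pvP nums k = pvP nums (m + 1) ∧ k ≤ m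
    · rw [dif_pos h] at hlook
      have hfa : pvFA nums st m =
          (max st.1 ((m : Int) -
              ((Nat.find (p := fun k => pvP nums k = pvP nums (m + 1))
                (h.imp fun _ hk => hk.1) : Int) - 1)),
            (pvP nums (m + 1)).1, (pvP nums (m + 1)).2, st.2.2.2) := by
        simp only [pvFA]
        rw [e1, e2]
        simp only [Prod.mk.eta]
        rw [hlook]
      rw [hfa]
      refine ⟨?_, rfl, rfl, ?_⟩
      · rw [ih1, pv_AV_succ]
        have hg : pvG nums (m + 1) =
            Nat.find (p := fun k => pvP nums k = pvP nums (m + 1))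
              (h.imp fun _ hk => hk.1) := rfl
        rw [hg]
        congr 1
        push_cast
        ring
      · intro s
        rw [ih4 s]
        by_cases hs : ∃ k, pvP nums k = s ∧ k ≤ m
        · rw [dif_pos hs, dif_pos (hs.imp fun k hk => ⟨hk.1, by omega⟩)]
        · have hs' : ¬ ∃ k, pvP nums k = s ∧ k ≤ m + 1 := by
            rintro ⟨k, hk, hk1⟩
            rcases Nat.lt_or_ge k (m + 1) with hlt | hge
            · exact hs ⟨k, hk, by omega⟩
            · have hkm : k = m + 1 := by omega
              subst hkm
              obtain ⟨k', hk', hk'm⟩ := h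
              exact hs ⟨k', hk'.trans hk, by omega⟩
          rw [dif_neg hs, dif_neg hs']
    · rw [dif_neg h] at hlook
      have hfa : pvFA nums st m =
          (st.1, (pvP nums (m + 1)).1, (pvP nums (m + 1)).2,
            st.2.2.2.insert (pvP nums (m + 1)) (m : Int)) := by
        simp only [pvFA]
        rw [e1, e2]
        simp only [Prod.mk.eta]
        rw [hlook]
      rw [hfa]
      have hgm : pvG nums (m + 1) = m + 1 := by
        unfold pvG
        rw [Nat.find_eq_iff]
        exact ⟨rfl, fun j hj hPj => h ⟨j, hPj, by omega⟩⟩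
      refine ⟨?_, rfl, rfl, ?_⟩
      · rw [ih1, pv_AV_succ, hgm]
        push_cast
        simp
        exact pv_AV_nonneg nums m
      · intro s
        by_cases hs : s = pvP nums (m + 1)
        · rw [hs, PySem.Dict.get?_insert_self]
          have hex : ∃ k, pvP nums k = pvP nums (m + 1) ∧ k ≤ m + 1 := ⟨m + 1, rfl, le_refl _⟩
          rw [dif_pos hex]
          have hf2 : Nat.find (p := fun k => pvP nums k = pvP nums (m + 1))
              (hex.imp fun _ hk => hk.1) = m + 1 := by
            rw [Nat.find_eq_iff]
            exact ⟨rfl, fun j hj hPj => h ⟨j, hPj, by omega⟩⟩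
          rw [hf2]
          congr 1
          push_cast
          ring
        · rw [PySem.Dict.get?_insert_of_ne _ _ hs, ih4 s]
          by_cases hs2 : ∃ k, pvP nums k = s ∧ k ≤ m
          · rw [dif_pos hs2, dif_pos (hs2.imp fun k hk => ⟨hk.1, by omega⟩)]
          · have hs2' : ¬ ∃ k, pvP nums k = s ∧ k ≤ m + 1 := by
              rintro ⟨k, hk, hk1⟩
              rcases Nat.lt_or_ge k (m + 1) with hlt | hge
              · exact hs2 ⟨k, hk, by omega⟩
              · have hkm : k = m + 1 := by omega
                subst hkm
                exact hs hk.symm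
            rw [dif_neg hs2, dif_neg hs2']

-- ---- B's loop invariant ----
def pvFB (nums : List Int) (i : Nat) (st : Int × Int × Int) (k : Nat) : Int × Int × Int :=
  let xr := PySem.Int.bxor st.2.1 (nums.getD (i + k) 0)
  let bal := if PySem.Int.mod (nums.getD (i + k) 0) 2 = 0 then st.2.2 + 1 else st.2.2 - 1
  ((if xr = 0 ∧ bal = 0 then max st.1 ((k : Int) + 1) else st.1), xr, bal)

def pvBInner (nums : List Int) (i c : Nat) (a : Int) : Int :=
  (List.range c).foldl
    (fun acc k => if pvP nums (i + k + 1) = pvP nums i then max acc ((k : Int) + 1) else acc) a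

theorem pv_B_norm (nums : List Int) :
    maxBalancedSubarray_alt nums =
      (List.range nums.length).foldl
        (fun ans i => ((List.range (nums.length - i)).foldl (pvFB nums i) (ans, 0, 0)).1) 0 := by
  unfold maxBalancedSubarray_alt
  simp only [PySem.List.pyRange_one, List.foldl_map]
  have h2 : (((nums.length : Int)) - 0).toNat = nums.length := by omega
  rw [h2]
  apply List.foldl_ext
  intro a i hi
  have hi' : i < nums.length := List.mem_range.mp hi
  have h3 : (((nums.length : Int)) - (0 + (i : Int))).toNat = nums.length - i := by omega
  rw [h3]
  congr 1
  apply List.foldl_ext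
  intro st k _
  have hik : ((0 : Int) + (i : Int) + (k : Int)) = ((i + k : Nat) : Int) := by push_cast; ring
  have hc : (((i + k : Nat) : Int) - (0 + (i : Int)) + 1) = ((k : Nat) : Int) + 1 := by
    push_cast; ring
  simp only [pvFB, hik, hc, PySem.List.pyGetD_natCast]

theorem pv_B_inner (nums : List Int) (i : Nat) (a : Int) :
    ∀ c, i + c ≤ nums.length →
      (List.range c).foldl (pvFB nums i) (a, 0, 0) =
        (pvBInner nums i c a, (pvQ nums i (i + c)).1, (pvQ nums i (i + c)).2) := by
  intro c
  induction c with
  | zero =>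
    intro _
    simp [pvBInner, pv_Q_self]
  | succ c ih =>
    intro hc
    have hc' : i + c ≤ nums.length := by omega
    rw [List.range_succ, List.foldl_append, ih hc']
    simp only [List.foldl_cons, List.foldl_nil]
    have hm : i + c < nums.length := by omega
    have hQ : pvQ nums i (i + c + 1) = pvStep (pvQ nums i (i + c)) (nums.getD (i + c) 0) :=
      pv_Q_succ nums i (i + c) (by omega) hm
    have hiff : ((pvQ nums i (i + c + 1)).1 = 0 ∧ (pvQ nums i (i + c + 1)).2 = 0) ↔
        pvP nums (i + c + 1) = pvP nums i := by
      rw [← pv_Q_zero_iff nums i (i + c + 1) (by omega)]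
      constructor
      · rintro ⟨h1, h2⟩; exact Prod.ext h1 h2
      · intro h; rw [h]; exact ⟨rfl, rfl⟩
    have e1 : PySem.Int.bxor (pvQ nums i (i + c)).1 (nums.getD (i + c) 0) =
        (pvQ nums i (i + c + 1)).1 := by rw [hQ]; rfl
    have e2 : (if PySem.Int.mod (nums.getD (i + c) 0) 2 = 0 then (pvQ nums i (i + c)).2 + 1
        else (pvQ nums i (i + c)).2 - 1) = (pvQ nums i (i + c + 1)).2 := by rw [hQ]; rfl
    have hAdd : i + (c + 1) = i + c + 1 := by omega
    rw [hAdd]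
    simp only [pvFB, pvBInner, List.range_succ, List.foldl_append, List.foldl_cons,
      List.foldl_nil, e1, e2]
    by_cases hp : pvP nums (i + c + 1) = pvP nums i
    · rw [if_pos (hiff.mpr hp), if_pos hp]
    · rw [if_neg (fun hcon => hp (hiff.mp hcon)), if_neg hp]

-- ---- the two closed forms agree ----
theorem pv_AV_eq_B (nums : List Int) :
    pvAV nums nums.length =
      (List.range nums.length).foldl (fun a i => pvBInner nums i (nums.length - i) a) 0 := by
  have hstep_in : ∀ (i : Nat) (a : Int) (k : Nat),
      a ≤ (if pvP nums (i + k + 1) = pvP nums i then max a ((k : Int) + 1) else a) := by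
    intro i a k
    split_ifs
    · exact le_max_left _ _
    · exact le_refl a
  have hstep_out : ∀ (a : Int) (i : Nat), a ≤ pvBInner nums i (nums.length - i) a := by
    intro a i
    exact pv_le_foldl _ _ a (fun x y => hstep_in i x y)
  have hB0 : 0 ≤ (List.range nums.length).foldl
      (fun a i => pvBInner nums i (nums.length - i) a) 0 :=
    pv_le_foldl _ _ 0 hstep_out
  have hAstep : ∀ (a : Int) (b : Nat), a ≤ max a ((b : Int) - (pvG nums b : Int)) :=
    fun a b => le_max_left _ _
  apply le_antisymm
  · -- A's closed form ≤ B's closed form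
    unfold pvAV
    apply pv_foldl_le _ _ _ 0 hB0
    intro a b hb ha
    apply max_le ha
    by_cases hgb : pvG nums b = b
    · rw [hgb]; simpa using hB0
    · have hgb' : pvG nums b < b := lt_of_le_of_ne (pv_G_le nums b) hgb
      have hbn : b ≤ nums.length := by
        have := List.mem_range.mp hb; omega
      apply pv_foldl_ge _ _ 0 (pvG nums b) _ hstep_out
        (List.mem_range.mpr (by omega))
      intro a'
      show ((b : Int) - (pvG nums b : Int)) ≤ pvBInner nums (pvG nums b) _ a'
      unfold pvBInner
      apply pv_foldl_ge _ _ a' (b - pvG nums b - 1) _ (fun x y => hstep_in (pvG nums b) x y)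
        (List.mem_range.mpr (by omega))
      intro acc
      have hidx : pvG nums b + (b - pvG nums b - 1) + 1 = b := by omega
      rw [hidx, if_pos (pv_G_spec nums b).symm]
      have : ((b - pvG nums b - 1 : Nat) : Int) + 1 = (b : Int) - (pvG nums b : Int) := by
        push_cast [Nat.sub_sub]
        omega
      rw [this]
      exact le_max_right _ _
  · -- B's closed form ≤ A's closed form
    apply pv_foldl_le _ _ _ 0 (pv_AV_nonneg nums nums.length)
    intro a i hi ha
    unfold pvBInner
    apply pv_foldl_le _ _ _ a ha
    intro acc k hk hacc
    have hkn : i + k + 1 ≤ nums.length := by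
      have h1 := List.mem_range.mp hi
      have h2 := List.mem_range.mp hk
      omega
    split_ifs with hp
    · apply max_le hacc
      unfold pvAV
      apply pv_foldl_ge _ _ 0 (i + k + 1) _ hAstep (List.mem_range.mpr (by omega))
      intro a'
      apply le_trans _ (le_max_right a' _)
      have hgle : pvG nums (i + k + 1) ≤ i := pv_G_min nums (i + k + 1) i hp.symm
      push_cast
      omega
    · exact hacc

-- ===== VERDICT (by name: the statement is the Claim_ definition above) =====
theorem maxBalancedSubarray_spec : Claim_equal_maxBalancedSubarray := by
  intro nums _
  unfold Spec_maxBalancedSubarray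
  rw [pv_B_norm]
  have hBfold : (List.range nums.length).foldl
      (fun ans i => ((List.range (nums.length - i)).foldl (pvFB nums i) (ans, 0, 0)).1) 0 =
      (List.range nums.length).foldl (fun a i => pvBInner nums i (nums.length - i) a) 0 := by
    apply List.foldl_ext
    intro a i hi
    have hi' : i < nums.length := List.mem_range.mp hi
    rw [pv_B_inner nums i a (nums.length - i) (by omega)]
  rw [hBfold, ← pv_AV_eq_B]
  by_cases h1 : nums.length = 1
  · have hA : maxBalancedSubarray nums = 0 := by
      unfold maxBalancedSubarray
      simp [h1]
    rw [hA, h1]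
    have hg1 : pvG nums 1 = 1 := by
      unfold pvG
      rw [Nat.find_eq_iff]
      refine ⟨rfl, ?_⟩
      intro j hj
      have hj0 : j = 0 := by omega
      subst hj0
      intro hcon
      have h01 : pvP nums 1 = pvStep (pvP nums 0) (nums.getD 0 0) := pv_P_succ nums 0 (by omega)
      have hsnd : (pvP nums 1).2 = (pvP nums 0).2 := by rw [← hcon]
      have hp0 : pvP nums 0 = ((0 : Int), (0 : Int)) := rfl
      rw [h01, hp0] at hsnd
      simp only [pvStep] at hsnd
      split_ifs at hsnd <;> omega
    have hav : pvAV nums 1 = 0 := by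
      have hg0 : pvG nums 0 = 0 := Nat.le_zero.mp (pv_G_le nums 0)
      unfold pvAV
      simp [List.range_succ, hg0, hg1]
    rw [hav]
  · rw [pv_A_norm nums h1, (pv_A_inv nums nums.length (le_refl _)).1]
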